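-- pv_equiv track=rewrite | github.com/CuleDood911/ConnectShapes | awdawd.py | clicklocation
-- ===== SOURCE A (Python) =====
-- def clicklocation(x, y,lent):
--     grid = []
--     length = lent
--     reps = -1
--     count = 0
--     while reps < (y - 1):
--         reps += 1
--         for i in range(x):
--             count += 1
--             grid.append([-length + 1 * i, length + 1 * i, -length - 1 * reps, length - 1 * reps, count])
--     return grid
-- ===== SOURCE B (Python) =====
-- def clicklocation(x, y, lent):
--     if x <= 0 or y <= 0:
--         return []
--     # first block of rows (reps = 0), built directly
--     block = [[-lent + i, lent + i, -lent, lent, i + 1] for i in range(x)]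
--     grid = list(block)
--     # each later block is the previous one shifted: reps fields -1, counter +x
--     for _ in range(y - 1):
--         block = [[a, b, c - 1, d - 1, e + x] for a, b, c, d, e in block]
--         grid.extend(block)
--     return grid
-- ===== Notes on version B (the rewrite author's own statement) =====
-- stated objective: alternative
-- what changed: B builds only the first row-block directly and derives every subsequent block by transforming the previous block (decrement the two reps fields, add x to the counter), extending the grid block by block, instead of A's nested while/for loops that recompute each entry from scratch with a running counter.
import Mathlib
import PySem

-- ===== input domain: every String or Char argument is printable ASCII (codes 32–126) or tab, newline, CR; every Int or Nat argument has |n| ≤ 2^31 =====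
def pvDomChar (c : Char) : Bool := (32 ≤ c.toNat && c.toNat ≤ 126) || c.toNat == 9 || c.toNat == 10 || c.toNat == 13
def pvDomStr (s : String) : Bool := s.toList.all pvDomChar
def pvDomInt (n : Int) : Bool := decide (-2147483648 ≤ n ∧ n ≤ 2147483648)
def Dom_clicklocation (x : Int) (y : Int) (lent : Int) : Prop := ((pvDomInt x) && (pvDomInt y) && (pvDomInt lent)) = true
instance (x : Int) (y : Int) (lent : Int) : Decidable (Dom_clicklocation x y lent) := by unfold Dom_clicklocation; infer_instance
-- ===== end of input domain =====

-- B builds the first row-block directly and then derives each subsequent block by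
-- transforming the previous block (reps fields -1, counter +x), instead of A's nested
-- loops recomputing every entry with a running counter (objective: alternative).

-- ===== PORT A =====
-- inner 'for i in range(x)' body: count += 1; grid.append([...])
def clickInnerStep (lent reps : Int) (gc : List (List Int) × Int) (i : Int) :
    List (List Int) × Int :=
  let count := gc.2 + 1
  (gc.1 ++ [[-lent + 1 * i, lent + 1 * i, -lent - 1 * reps, lent - 1 * reps, count]], count)

-- the 'while reps < (y - 1)' loop
def clickLoop (x y lent : Int) (reps count : Int) (grid : List (List Int)) :
    List (List Int) :=
  if h : reps < y - 1 then
    let reps' := reps + 1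
    let gc := (PySem.List.pyRange 0 x 1).foldl (clickInnerStep lent reps') (grid, count)
    clickLoop x y lent reps' gc.2 gc.1
  else grid
termination_by (y - 1 - reps).toNat
decreasing_by omega

def clicklocation (x : Int) (y : Int) (lent : Int) : List (List Int) :=
  clickLoop x y lent (-1) 0 []

-- ===== PORT B =====
-- the per-row shift '[a, b, c - 1, d - 1, e + x]' (Python's unpacking raises on a
-- non-5-element row; rows here always have 5 elements, fallback is unreachable)
def bumpRow (x : Int) (row : List Int) : List Int :=
  match row with
  | [a, b, c, d, e] => [a, b, c - 1, d - 1, e + x]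
  | l => l

def clicklocation_alt (x : Int) (y : Int) (lent : Int) : List (List Int) :=
  if x ≤ 0 ∨ y ≤ 0 then []
  else
    let block0 := (PySem.List.pyRange 0 x 1).map
      (fun i => [-lent + i, lent + i, -lent, lent, i + 1])
    let st := (PySem.List.pyRange 0 (y - 1) 1).foldl
      (fun (s : List (List Int) × List (List Int)) _ =>
        let block' := s.1.map (bumpRow x)
        (block', s.2 ++ block')) (block0, block0)
    st.2

-- ===== PRECONDITION & SPEC =====
def Spec_clicklocation (x : Int) (y : Int) (lent : Int) (out : List (List Int)) : Prop := out = clicklocation_alt x y lent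
instance (x : Int) (y : Int) (lent : Int) (out : List (List Int)) : Decidable (Spec_clicklocation x y lent out) := by unfold Spec_clicklocation; infer_instance

-- ===== CLAIM (what is proved, stated in full; the proofs are below) =====
def Claim_equal_clicklocation : Prop := ∀ (x : Int) (y : Int) (lent : Int), Dom_clicklocation x y lent → Spec_clicklocation x y lent (clicklocation x y lent)

-- ===== LEMMAS AND PROOFS =====

-- the block of rows A appends during one pass of the while body (reps = r, count starts at c0)
def rowsA (x lent r c0 : Int) : List (List Int) :=
  (List.range x.toNat).map (fun i : Nat =>
    [-lent + 1 * (i : Int), lent + 1 * (i : Int), -lent - 1 * r, lent - 1 * r, c0 + (i : Int) + 1])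

-- what the remaining k iterations of A's while loop append
def tailA (x lent : Int) : Nat → Int → Int → List (List Int)
  | 0, _, _ => []
  | (k+1), reps, count =>
      rowsA x lent (reps + 1) count ++ tailA x lent k (reps + 1) (count + (x.toNat : Int))

-- the canonical block for reps = r
def blkB (x lent : Int) (r : Nat) : List (List Int) :=
  (List.range x.toNat).map (fun i : Nat =>
    [-lent + (i : Int), lent + (i : Int), -lent - (r : Int), lent - (r : Int),
     ((r * x.toNat + i : Nat) : Int) + 1])

lemma inner_aux (lent r : Int) (m : Nat) : ∀ (grid : List (List Int)) (c : Int),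
    ((List.range m).map (fun k : Nat => ((0 : Int) + k))).foldl (clickInnerStep lent r) (grid, c)
    = (grid ++ (List.range m).map (fun i : Nat =>
        [-lent + 1 * (i : Int), lent + 1 * (i : Int), -lent - 1 * r, lent - 1 * r,
         c + (i : Int) + 1]),
       c + m) := by
  induction m with
  | zero => simp
  | succ m ih =>
      intro grid c
      rw [List.range_succ]
      simp only [List.map_append, List.foldl_append, ih]
      simp [clickInnerStep]
      omega

lemma inner_fold (x lent r : Int) (grid : List (List Int)) (c : Int) :
    (PySem.List.pyRange 0 x 1).foldl (clickInnerStep lent r) (grid, c)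
    = (grid ++ rowsA x lent r c, c + (x.toNat : Int)) := by
  rw [PySem.List.pyRange_one]
  have h0 : (x - 0).toNat = x.toNat := by omega
  rw [h0, inner_aux, rowsA]

lemma loop_char (x y lent : Int) : ∀ (k : Nat) (reps count : Int) (grid : List (List Int)),
    (y - 1 - reps).toNat = k →
    clickLoop x y lent reps count grid = grid ++ tailA x lent k reps count := by
  intro k
  induction k with
  | zero =>
      intro reps count grid h
      rw [clickLoop, dif_neg (by omega)]
      simp [tailA]
  | succ k ih =>
      intro reps count grid h
      rw [clickLoop, dif_pos (by omega : reps < y - 1)]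
      simp only [inner_fold]
      rw [ih (reps + 1) _ _ (by omega)]
      simp [tailA]

lemma rowsA_eq_blkB (x lent : Int) (r : Nat) :
    rowsA x lent ((r : Int) - 1 + 1) ((r * x.toNat : Nat) : Int) = blkB x lent r := by
  unfold rowsA blkB
  apply List.map_congr_left
  intro i _
  push_cast
  ring_nf

lemma tailA_blocks (x lent : Int) : ∀ (k r : Nat),
    tailA x lent k ((r : Int) - 1) ((r * x.toNat : Nat) : Int)
    = ((List.range k).map (fun j => blkB x lent (r + j))).flatten := by
  intro k
  induction k with
  | zero => intro r; simp [tailA]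
  | succ k ih =>
      intro r
      simp only [tailA]
      rw [rowsA_eq_blkB]
      have e1 : ((r : Int) - 1 + 1) = ((r + 1 : Nat) : Int) - 1 := by push_cast; ring
      have e2 : ((r * x.toNat : Nat) : Int) + (x.toNat : Int)
          = (((r + 1) * x.toNat : Nat) : Int) := by push_cast; ring
      rw [e1, e2, ih (r + 1)]
      rw [List.range_succ_eq_map, List.map_cons, List.flatten_cons, List.map_map]
      have hmap : List.map ((fun j => blkB x lent (r + j)) ∘ Nat.succ) (List.range k)
          = List.map (fun j => blkB x lent (r + 1 + j)) (List.range k) :=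
        List.map_congr_left (fun j _ => by simp only [Function.comp]; congr 1; omega)
      rw [hmap]
      simp

lemma bump_blk (x lent : Int) (hx : 0 ≤ x) (r : Nat) :
    (blkB x lent r).map (bumpRow x) = blkB x lent (r + 1) := by
  obtain ⟨a, rfl⟩ := Int.eq_ofNat_of_zero_le hx
  unfold blkB
  rw [List.map_map]
  apply List.map_congr_left
  intro i _
  simp only [Function.comp, bumpRow, Int.toNat_natCast, List.cons.injEq, and_true]
  refine ⟨trivial, trivial, ?_, ?_, ?_⟩ <;> push_cast <;> ring

lemma foldB (x lent : Int) (hx : 0 ≤ x) :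
    ∀ (l : List Int) (r : Nat) (g : List (List Int)),
    l.foldl (fun (s : List (List Int) × List (List Int)) _ =>
        let block' := s.1.map (bumpRow x)
        (block', s.2 ++ block')) (blkB x lent r, g)
    = (blkB x lent (r + l.length),
       g ++ ((List.range l.length).map (fun j => blkB x lent (r + 1 + j))).flatten) := by
  intro l
  induction l with
  | nil =>
      intro r g
      simp only [List.foldl_nil, List.length_nil, List.range_zero, List.map_nil,
        List.flatten_nil, List.append_nil, Nat.add_zero]
  | cons a l ih =>
      intro r g
      simp only [List.foldl_cons]
      rw [bump_blk x lent hx, ih (r + 1)]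
      simp only [List.length_cons]
      rw [List.range_succ_eq_map, List.map_cons, List.flatten_cons, List.map_map]
      have hmap : List.map ((fun j => blkB x lent (r + 1 + j)) ∘ Nat.succ) (List.range l.length)
          = List.map (fun j => blkB x lent (r + 1 + 1 + j)) (List.range l.length) :=
        List.map_congr_left (fun j _ => by simp only [Function.comp]; congr 1; omega)
      rw [hmap]
      have hr : r + 1 + l.length = r + (l.length + 1) := by omega
      rw [hr]
      simp [List.append_assoc]

lemma block0_eq (x lent : Int) :
    (PySem.List.pyRange 0 x 1).map (fun i => [-lent + i, lent + i, -lent, lent, i + 1])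
    = blkB x lent 0 := by
  rw [PySem.List.pyRange_one]
  have h0 : (x - 0).toNat = x.toNat := by omega
  rw [h0, List.map_map]
  unfold blkB
  apply List.map_congr_left
  intro i _
  simp [Function.comp]

-- ===== VERDICT (by name: the statement is the Claim_ definition above) =====
theorem clicklocation_spec : Claim_equal_clicklocation := by
  intro x y lent _
  unfold Spec_clicklocation
  have hA : clicklocation x y lent
      = ((List.range (y - 1 - (-1)).toNat).map (fun j => blkB x lent (0 + j))).flatten := by
    rw [clicklocation, loop_char x y lent (y - 1 - (-1)).toNat (-1) 0 [] rfl, List.nil_append]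
    have := tailA_blocks x lent (y - 1 - (-1)).toNat 0
    simpa using this
  by_cases hy : y ≤ 0
  · rw [hA, clicklocation_alt, if_pos (Or.inr hy)]
    have h0 : (y - 1 - (-1)).toNat = 0 := by omega
    rw [h0]; simp
  · by_cases hxle : x ≤ 0
    · rw [hA, clicklocation_alt, if_pos (Or.inl hxle)]
      have h0 : x.toNat = 0 := by omega
      simp [blkB, h0]
    · have hx : (0:Int) ≤ x := by omega
      rw [hA]
      simp only [clicklocation_alt, if_neg (by omega : ¬ (x ≤ 0 ∨ y ≤ 0))]
      rw [block0_eq, foldB x lent hx]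
      have hlen : (PySem.List.pyRange 0 (y - 1) 1).length = y.toNat - 1 := by
        rw [PySem.List.pyRange_one]
        simp
      have hk : (y - 1 - (-1)).toNat = (y.toNat - 1) + 1 := by omega
      rw [hlen, hk, List.range_succ_eq_map, List.map_cons, List.flatten_cons, List.map_map]
      have hmap : List.map ((fun j => blkB x lent (0 + j)) ∘ Nat.succ) (List.range (y.toNat - 1))
          = List.map (fun j => blkB x lent (0 + 1 + j)) (List.range (y.toNat - 1)) :=
        List.map_congr_left (fun j _ => by simp only [Function.comp]; congr 1; omega)
      rw [hmap]
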